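-- pv_equiv track=rewrite | github.com/akhandsingh17/assignments | codingexercise/GroupShiftedString.py | GroupShiftedString
-- ===== SOURCE A (Python) =====
-- def GroupShiftedString(ary):
--
--     dict={}
--
--     for key in ary:
--
--         diff_lst=[]
--         for i in range(0,len(key)-1):
--             diff=ord(key[i+1])-ord(key[i])
--             diff_lst.append(str(diff))
--
--         if len(diff_lst)>0:
--
--             if ''.join(diff_lst) in dict.keys():
--                 dict[''.join(diff_lst)].append(key)
--             else:
--                 tmp=[]
--                 tmp.append(key)
--                 dict[''.join(diff_lst)]=tmp
--         else:
--             if str(1) in dict.keys():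
--                 dict[str(1)].append(key)
--             else:
--                 tmp=[]
--                 tmp.append(key)
--                 dict[str(1)]=tmp
--
--     return dict
-- ===== SOURCE B (Python) =====
-- def GroupShiftedString(ary):
--     def sig(s):
--         if len(s) <= 1:
--             return "1"
--         return ''.join(str(ord(b) - ord(a)) for a, b in zip(s, s[1:]))
--     sigs = [sig(s) for s in ary]
--     return {k: [s for s, g in zip(ary, sigs) if g == k] for k in dict.fromkeys(sigs)}
-- ===== Notes on version B (the rewrite author's own statement) =====
-- stated objective: alternative
-- what changed: B computes each string's diff signature once as a pure function, dedups the signatures with dict.fromkeys to fix the key order, and builds each group by a per-key filter over (string, signature) pairs, replacing A's incremental dict with membership tests and in-place appends.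
import Mathlib
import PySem

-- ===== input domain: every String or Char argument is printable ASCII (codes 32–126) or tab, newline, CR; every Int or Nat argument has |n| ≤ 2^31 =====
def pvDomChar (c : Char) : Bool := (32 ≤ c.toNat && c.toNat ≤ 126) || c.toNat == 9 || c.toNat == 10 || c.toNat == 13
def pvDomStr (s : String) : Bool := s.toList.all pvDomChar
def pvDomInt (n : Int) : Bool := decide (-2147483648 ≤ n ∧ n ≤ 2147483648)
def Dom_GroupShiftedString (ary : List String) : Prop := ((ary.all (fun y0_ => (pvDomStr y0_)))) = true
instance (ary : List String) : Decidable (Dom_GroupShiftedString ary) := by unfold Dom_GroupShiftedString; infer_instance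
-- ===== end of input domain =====

-- B groups by a signature computed once per string, dedups signatures for the key order and
-- builds each group by a per-key filter, instead of A's incremental dict updates (objective: alternative).

-- ===== PORT A =====
-- loop body of A's 'for key in ary' (builds diff_lst by index, then updates the dict)
def pvStepA (d : PySem.Dict String (List String)) (key : String) : PySem.Dict String (List String) :=
  let cs := key.toList
  let diff_lst : List String := (List.range (cs.length - 1)).foldl
    (fun acc i => acc ++ [PySem.Int.toStr ((cs[i+1]!.toNat : Int) - (cs[i]!.toNat : Int))]) []
  if diff_lst.length > 0 then
    if d.contains (PySem.Str.join "" diff_lst) then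
      d.modify (PySem.Str.join "" diff_lst) [] (fun v => v ++ [key])
    else
      d.insert (PySem.Str.join "" diff_lst) [key]
  else
    if d.contains (PySem.Int.toStr 1) then
      d.modify (PySem.Int.toStr 1) [] (fun v => v ++ [key])
    else
      d.insert (PySem.Int.toStr 1) [key]

def GroupShiftedString (ary : List String) : List (String × List String) :=
  (ary.foldl pvStepA PySem.Dict.empty).items

-- ===== PORT B =====
-- B's helper sig(s)
def pvSig (s : String) : String :=
  if s.toList.length ≤ 1 then "1"
  else PySem.Str.join ""
    ((s.toList.zip (PySem.List.slice s.toList (some 1))).map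
      (fun p => PySem.Int.toStr ((p.2.toNat : Int) - (p.1.toNat : Int))))

def GroupShiftedString_alt (ary : List String) : List (String × List String) :=
  let sigs := ary.map pvSig
  (PySem.List.dedup sigs).map (fun k =>
    (k, ((ary.zip sigs).filter (fun p => p.2 == k)).map (fun p => p.1)))

-- ===== PRECONDITION & SPEC =====
def Spec_GroupShiftedString (ary : List String) (out : List (String × List String)) : Prop := out = GroupShiftedString_alt ary
instance (ary : List String) (out : List (String × List String)) : Decidable (Spec_GroupShiftedString ary out) := by unfold Spec_GroupShiftedString; infer_instance

-- ===== CLAIM (what is proved, stated in full; the proofs are below) =====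
def Claim_equal_GroupShiftedString : Prop := ∀ (ary : List String), Dom_GroupShiftedString ary → Spec_GroupShiftedString ary (GroupShiftedString ary)

-- ===== LEMMAS AND PROOFS =====

-- consecutive index pairs of cs are exactly cs zipped with its tail
theorem pvRangePair (cs : List Char) :
    (List.range (cs.length - 1)).map (fun i => (cs[i]!, cs[i+1]!)) = cs.zip (cs.drop 1) := by
  induction cs with
  | nil => rfl
  | cons a t ih =>
    cases t with
    | nil => rfl
    | cons b t' =>
      simp only [List.length_cons, Nat.add_sub_cancel] at ih ⊢
      rw [List.range_succ_eq_map, List.map_cons, List.map_map]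
      simp only [Function.comp_def, Nat.succ_eq_add_one, List.getElem!_cons_succ,
        List.getElem!_cons_zero] at ih ⊢
      rw [ih]
      rfl

-- A's loop body is one unconditional modify at the signature pvSig key
theorem pvStepA_eq (d : PySem.Dict String (List String)) (key : String) :
    pvStepA d key = d.modify (pvSig key) [] (fun v => v ++ [key]) := by
  simp only [pvStepA, pvSig, PySem.List.foldl_append_singleton_eq_map, List.nil_append]
  by_cases h : key.toList.length ≤ 1
  · have h0 : key.toList.length - 1 = 0 := by omega
    simp only [h0, List.range_zero, List.map_nil, List.length_nil, gt_iff_lt,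
      lt_irrefl, if_false, if_pos h]
    have h1 : PySem.Int.toStr 1 = "1" := rfl
    rw [h1]
    by_cases hc : d.contains "1"
    · rw [if_pos hc]
    · rw [if_neg hc]
      unfold PySem.Dict.modify
      rw [PySem.Dict.getD, (PySem.Dict.get?_eq_none_iff_contains d _).mpr
        (by simpa using hc)]
      rfl
  · rw [PySem.List.slice_from key.toList (by norm_num : (0:Int) ≤ 1)]
    have h1 : ((1:Int)).toNat = 1 := rfl
    rw [h1]
    have hsig : List.map (fun i => PySem.Int.toStr ((key.toList[i+1]!.toNat : Int) - (key.toList[i]!.toNat : Int)))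
        (List.range (key.toList.length - 1))
      = (key.toList.zip (key.toList.drop 1)).map
          (fun p => PySem.Int.toStr ((p.2.toNat : Int) - (p.1.toNat : Int))) := by
      rw [← pvRangePair key.toList, List.map_map]
      rfl
    have hlen : 0 < (List.map (fun i => PySem.Int.toStr ((key.toList[i+1]!.toNat : Int) - (key.toList[i]!.toNat : Int)))
        (List.range (key.toList.length - 1))).length := by
      simp only [List.length_map, List.length_range]
      omega
    rw [if_pos hlen, if_neg h, hsig]
    by_cases hc : d.contains (PySem.Str.join "" ((key.toList.zip (key.toList.drop 1)).map
        (fun p => PySem.Int.toStr ((p.2.toNat : Int) - (p.1.toNat : Int)))))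
    · rw [if_pos hc]
    · rw [if_neg hc]
      unfold PySem.Dict.modify
      rw [PySem.Dict.getD, (PySem.Dict.get?_eq_none_iff_contains d _).mpr
        (by simpa using hc)]
      rfl

theorem pvZipSelf (ary : List String) :
    ary.zip (ary.map pvSig) = ary.map (fun s => (s, pvSig s)) := by
  induction ary with
  | nil => rfl
  | cons a t ih => simp [ih]

theorem GroupShiftedString_eq (ary : List String) :
    GroupShiftedString ary = GroupShiftedString_alt ary := by
  unfold GroupShiftedString GroupShiftedString_alt
  have hF : pvStepA = fun d key => d.modify (pvSig key) [] (fun v => v ++ [key]) := by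
    funext d key; exact pvStepA_eq d key
  rw [hF]
  have hnd : (ary.foldl (fun d key => d.modify (pvSig key) [] (fun v => v ++ [key]))
      PySem.Dict.empty).keys.Nodup :=
    PySem.Dict.nodup_keys_foldl_modify_key ary pvSig [] (fun _ key => (fun v => v ++ [key]))
      PySem.Dict.empty (by simp [PySem.Dict.empty, PySem.Dict.keys])
  rw [PySem.Dict.items_eq_map_keys _ hnd []]
  rw [PySem.Dict.keys_foldl_modify_key ary pvSig [] (fun _ key => (fun v => v ++ [key]))]
  have hkeys : PySem.Set.update (PySem.Dict.empty : PySem.Dict String (List String)).keys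
      (ary.map pvSig) = PySem.List.dedup (ary.map pvSig) := by
    rw [PySem.List.dedup_eq_ofList, PySem.Set.ofList_eq_foldl]
    rfl
  rw [hkeys]
  apply List.map_congr_left
  intro k _
  refine Prod.ext rfl ?_
  show (ary.foldl (fun d key => d.modify (pvSig key) [] (fun v => v ++ [key]))
      PySem.Dict.empty).getD k [] = _
  have hfold : ary.foldl (fun d key => d.modify (pvSig key) [] (fun v => v ++ [key]))
      PySem.Dict.empty
      = (ary.map (fun s => (pvSig s, s))).foldl
          (fun d p => d.modify p.1 [] (fun v => v ++ [p.2])) PySem.Dict.empty := by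
    rw [List.foldl_map]
  rw [hfold, PySem.Dict.getD_foldl_modify_append]
  rw [pvZipSelf]
  simp [List.filter_map, Function.comp_def, PySem.Dict.getD, PySem.Dict.empty, PySem.Dict.get?]

-- ===== VERDICT (by name: the statement is the Claim_ definition above) =====
theorem GroupShiftedString_spec : Claim_equal_GroupShiftedString := by
  intro ary _
  show GroupShiftedString ary = GroupShiftedString_alt ary
  exact GroupShiftedString_eq ary
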